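-- pv_equiv track=rewrite | github.com/riquefsouza/hefesto_fastapi | base/util/BaseUtil.py | containsConsecutiveIdenticalCharacters
-- ===== SOURCE A (Python) =====
-- from typing import List
-- import string
--
-- def containsConsecutiveIdenticalCharacters(min: int, max: int, stexto: str):
--     lista: List[str] = []
--     sAlfaMin: str = ""
--
--     for c in list(string.ascii_lowercase):
--         for qtd in range(min, max+1):
--             sAlfaMin = ""
--             for i in range(1, qtd+1):
--                 sAlfaMin += str(c)
--             lista.append(sAlfaMin)
--             lista.append(sAlfaMin.upper())
--
--     return stexto in lista
-- ===== SOURCE B (Python) =====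
-- def containsConsecutiveIdenticalCharacters(min: int, max: int, stexto: str):
--     # Direct check: the generated list holds exactly the runs c*q (q in [min,max])
--     # of a single ASCII letter, all-lower or all-upper, plus "" when min <= 0 <= max range.
--     if min > max:
--         return False
--     if stexto == "":
--         return min <= 0
--     c = stexto[0]
--     if not ('a' <= c <= 'z' or 'A' <= c <= 'Z'):
--         return False
--     if any(ch != c for ch in stexto):
--         return False
--     return min <= len(stexto) <= max
-- ===== Notes on version B (the rewrite author's own statement) =====
-- stated objective: alternative
-- what changed: A materialises every run c*q for all 26 letters (upper and lower) and qtd in [min,max] by repeated string concatenation and then does a list membership test; B performs one direct scan of stexto checking all characters equal, the first is an ASCII letter, and the length lies in [min,max].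
import Mathlib
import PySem

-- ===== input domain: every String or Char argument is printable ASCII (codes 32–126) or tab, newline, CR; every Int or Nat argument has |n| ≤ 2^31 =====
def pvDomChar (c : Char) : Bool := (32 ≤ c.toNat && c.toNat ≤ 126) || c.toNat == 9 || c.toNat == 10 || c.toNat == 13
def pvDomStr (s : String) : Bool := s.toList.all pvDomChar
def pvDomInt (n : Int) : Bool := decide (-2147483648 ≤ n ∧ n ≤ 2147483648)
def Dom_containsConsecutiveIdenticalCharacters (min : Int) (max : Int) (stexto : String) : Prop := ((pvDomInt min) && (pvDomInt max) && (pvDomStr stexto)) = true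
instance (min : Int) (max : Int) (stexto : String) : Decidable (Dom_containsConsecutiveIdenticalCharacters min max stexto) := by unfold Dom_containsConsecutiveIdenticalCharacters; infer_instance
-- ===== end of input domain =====

-- B replaces A's generate-all-candidates-then-membership loop nest by one direct scan of
-- stexto: all characters equal, the first one an ASCII letter, length within [min, max].

-- ===== PORT A =====
-- literal transliteration of A: build `lista` with three nested loops, then `stexto in lista`.
-- Python strings are handled on the List Char side (sAlfaMin += str(c)  ↦  sAlfaMin ++ [c]).
def containsConsecutiveIdenticalCharacters (min : Int) (max : Int) (stexto : String) : Bool :=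
  let lista : List (List Char) :=
    "abcdefghijklmnopqrstuvwxyz".toList.foldl (fun lista c =>
      (PySem.List.pyRange min (max + 1) 1).foldl (fun lista qtd =>
        let sAlfaMin : List Char :=
          (PySem.List.pyRange 1 (qtd + 1) 1).foldl (fun s _ => s ++ [c]) []
        lista ++ [sAlfaMin, PySem.Chars.upper sAlfaMin]) lista) []
  decide (stexto.toList ∈ lista)

-- ===== PORT B =====
-- literal transliteration of Source B (early-return chain; `any` scans the string once).
def containsConsecutiveIdenticalCharacters_alt (min : Int) (max : Int) (stexto : String) : Bool :=
  if min > max then false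
  else
    match stexto.toList with
    | [] => decide (min ≤ 0)
    | c :: _ =>
      if !(('a' ≤ c && c ≤ 'z') || ('A' ≤ c && c ≤ 'Z')) then false
      else if stexto.toList.any (fun ch => decide (ch ≠ c)) then false
      else decide (min ≤ (stexto.toList.length : Int) ∧ (stexto.toList.length : Int) ≤ max)

-- ===== PRECONDITION & SPEC =====
def Spec_containsConsecutiveIdenticalCharacters (min : Int) (max : Int) (stexto : String) (out : Bool) : Prop := out = containsConsecutiveIdenticalCharacters_alt min max stexto
instance (min : Int) (max : Int) (stexto : String) (out : Bool) : Decidable (Spec_containsConsecutiveIdenticalCharacters min max stexto out) := by unfold Spec_containsConsecutiveIdenticalCharacters; infer_instance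

-- ===== CLAIM (what is proved, stated in full; the proofs are below) =====
def Claim_equal_containsConsecutiveIdenticalCharacters : Prop := ∀ (min : Int) (max : Int) (stexto : String), Dom_containsConsecutiveIdenticalCharacters min max stexto → Spec_containsConsecutiveIdenticalCharacters min max stexto (containsConsecutiveIdenticalCharacters min max stexto)

-- ===== LEMMAS AND PROOFS =====

-- the inner `for i in range(1, qtd+1): sAlfaMin += str(c)` loop builds a replicate
theorem pvFoldAppendChar (c : Char) (l : List Int) (s0 : List Char) :
    l.foldl (fun s (_ : Int) => s ++ [c]) s0 = s0 ++ List.replicate l.length c := by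
  induction l generalizing s0 with
  | nil => simp
  | cons x xs ih => simp [List.foldl_cons, ih, List.replicate_succ]

theorem pvRep (c : Char) (q : Int) :
    (PySem.List.pyRange 1 (q + 1) 1).foldl (fun s (_ : Int) => s ++ [c]) [] =
      List.replicate q.toNat c := by
  rw [pvFoldAppendChar, PySem.List.length_pyRange_one, List.nil_append]
  congr 1
  omega

theorem pvUpperRep (c : Char) (n : Nat) :
    PySem.Chars.upper (List.replicate n c) = List.replicate n (PySem.Chars.upperChar c) := by
  simp [PySem.Chars.upper]

-- A's `lista` in closed form
theorem pvLista (min max : Int) :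
    ("abcdefghijklmnopqrstuvwxyz".toList.foldl (fun lista c =>
        (PySem.List.pyRange min (max + 1) 1).foldl (fun lista qtd =>
          let sAlfaMin : List Char :=
            (PySem.List.pyRange 1 (qtd + 1) 1).foldl (fun s _ => s ++ [c]) []
          lista ++ [sAlfaMin, PySem.Chars.upper sAlfaMin]) lista) ([] : List (List Char)))
    = "abcdefghijklmnopqrstuvwxyz".toList.flatMap (fun c =>
        (PySem.List.pyRange min (max + 1) 1).flatMap (fun qtd =>
          [List.replicate qtd.toNat c,
           List.replicate qtd.toNat (PySem.Chars.upperChar c)])) := by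
  simp only [pvRep]
  simp only [pvUpperRep]
  simp only [PySem.List.foldl_append_eq_flatMap, List.nil_append]

theorem pvLowList : "abcdefghijklmnopqrstuvwxyz".toList =
    ['a','b','c','d','e','f','g','h','i','j','k','l','m','n','o','p','q','r','s','t','u','v','w','x','y','z'] := rfl

theorem pvCharRange (c lo hi : Char) :
    (lo ≤ c ∧ c ≤ hi) ↔ (lo.toNat ≤ c.toNat ∧ c.toNat ≤ hi.toNat) := by
  rw [Char.le_def, Char.le_def, UInt32.le_iff_toNat_le, UInt32.le_iff_toNat_le]
  exact Iff.rfl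

theorem pvToNatOfNat (n : Nat) (h : n < 55296) : (Char.ofNat n).toNat = n := by
  rw [Char.toNat_ofNat, if_pos (Or.inl h)]

-- membership in the lowercase alphabet list is exactly the code range 97..122
theorem pvMemLow (c : Char) :
    c ∈ "abcdefghijklmnopqrstuvwxyz".toList ↔ 97 ≤ c.toNat ∧ c.toNat ≤ 122 := by
  rw [pvLowList]
  constructor
  · intro h
    fin_cases h <;> simp
  · rintro ⟨h1, h2⟩
    have hc : c = Char.ofNat c.toNat := (Char.ofNat_toNat c).symm
    set n := c.toNat with hn
    rw [hc]
    interval_cases n <;> decide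

theorem pvUpperOf (n : Nat) (h1 : 97 ≤ n) (h2 : n ≤ 122) :
    PySem.Chars.upperChar (Char.ofNat n) = Char.ofNat (n - 32) := by
  interval_cases n <;> decide

-- forward: a member of A's lista that is nonempty is a run of one letter of admissible length
theorem pvFwd (min max : Int) (c₀ : Char) (rest : List Char)
    (h : ∃ c ∈ "abcdefghijklmnopqrstuvwxyz".toList, ∃ q : Int, (min ≤ q ∧ q < max + 1) ∧
      (c₀ :: rest = List.replicate q.toNat c ∨
       c₀ :: rest = List.replicate q.toNat (PySem.Chars.upperChar c))) :
    ¬ min > max ∧ (('a' ≤ c₀ ∧ c₀ ≤ 'z') ∨ ('A' ≤ c₀ ∧ c₀ ≤ 'Z')) ∧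
      (∀ b ∈ c₀ :: rest, b = c₀) ∧
      min ≤ ((c₀ :: rest).length : Int) ∧ ((c₀ :: rest).length : Int) ≤ max := by
  obtain ⟨c, hcmem, q, ⟨hq1, hq2⟩, hrep⟩ := h
  obtain ⟨hc1, hc2⟩ := (pvMemLow c).mp hcmem
  -- the run's character d is c or upperChar c; in both cases d = c₀ and d is a letter
  have hup : (PySem.Chars.upperChar c).toNat = c.toNat - 32 := by
    have h := pvUpperOf c.toNat hc1 hc2
    rw [Char.ofNat_toNat] at h
    rw [h, pvToNatOfNat (c.toNat - 32) (by omega)]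
  rcases hrep with hrep | hrep <;>
  · rw [List.eq_replicate_iff] at hrep
    obtain ⟨hlen, hall⟩ := hrep
    have hc₀ := hall c₀ List.mem_cons_self
    have hq : q = ((c₀ :: rest).length : Int) := by
      simp only [List.length_cons] at hlen ⊢
      omega
    subst hc₀
    refine ⟨by omega, ?_, hall, by omega, by omega⟩
    · first
      | exact Or.inl ((pvCharRange c₀ 'a' 'z').mpr ⟨hc1, hc2⟩)
      | exact Or.inr ((pvCharRange (PySem.Chars.upperChar c) 'A' 'Z').mpr (by
          rw [hup]
          constructor <;> [show 65 ≤ _; show _ ≤ 90] <;> omega))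

-- backward: a single-letter run of admissible length is in A's lista
theorem pvBwd (min max : Int) (c₀ : Char) (rest : List Char)
    (h : (¬ min > max ∧ (('a' ≤ c₀ ∧ c₀ ≤ 'z') ∨ ('A' ≤ c₀ ∧ c₀ ≤ 'Z')) ∧
      (∀ b ∈ c₀ :: rest, b = c₀) ∧
      min ≤ ((c₀ :: rest).length : Int) ∧ ((c₀ :: rest).length : Int) ≤ max)) :
    ∃ c ∈ "abcdefghijklmnopqrstuvwxyz".toList, ∃ q : Int, (min ≤ q ∧ q < max + 1) ∧
      (c₀ :: rest = List.replicate q.toNat c ∨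
       c₀ :: rest = List.replicate q.toNat (PySem.Chars.upperChar c)) := by
  obtain ⟨-, hletter, hall, hlo, hhi⟩ := h
  have hrepl : ∀ d : Char, c₀ = d → c₀ :: rest =
      List.replicate (((c₀ :: rest).length : Int)).toNat d := by
    intro d hd
    rw [List.eq_replicate_iff]
    exact ⟨by simp, fun b hb => (hall b hb).trans hd⟩
  have hA : 'A'.toNat = 65 := by decide
  have hZ : 'Z'.toNat = 90 := by decide
  have ha : 'a'.toNat = 97 := by decide
  have hz : 'z'.toNat = 122 := by decide
  rcases hletter with ⟨h1, h2⟩ | ⟨h1, h2⟩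
  · -- lowercase run: take c := c₀ itself
    obtain ⟨h1', h2'⟩ := (pvCharRange c₀ 'a' 'z').mp ⟨h1, h2⟩
    rw [ha] at h1'
    rw [hz] at h2'
    exact ⟨c₀, (pvMemLow c₀).mpr ⟨h1', h2'⟩, ((c₀ :: rest).length : Int),
      ⟨hlo, by omega⟩, Or.inl (hrepl c₀ rfl)⟩
  · -- uppercase run: take c := the lowercase partner, code c₀.toNat + 32
    obtain ⟨h1', h2'⟩ := (pvCharRange c₀ 'A' 'Z').mp ⟨h1, h2⟩
    rw [hA] at h1'
    rw [hZ] at h2'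
    refine ⟨Char.ofNat (c₀.toNat + 32), (pvMemLow _).mpr ?_, ((c₀ :: rest).length : Int),
      ⟨hlo, by omega⟩, Or.inr (hrepl _ ?_)⟩
    · rw [pvToNatOfNat (c₀.toNat + 32) (by omega)]
      omega
    · rw [pvUpperOf (c₀.toNat + 32) (by omega) (by omega), Nat.add_sub_cancel,
        Char.ofNat_toNat]

-- B's early-return chain, as a proposition
theorem pvBoolIff (min max : Int) (c₀ : Char) (rest : List Char) :
    ((if min > max then false
      else
        if !(('a' ≤ c₀ && c₀ ≤ 'z') || ('A' ≤ c₀ && c₀ ≤ 'Z')) then false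
        else if (c₀ :: rest).any (fun ch => decide (ch ≠ c₀)) then false
        else decide (min ≤ ((c₀ :: rest).length : Int) ∧ ((c₀ :: rest).length : Int) ≤ max)) = true)
    ↔ (¬ min > max ∧ (('a' ≤ c₀ ∧ c₀ ≤ 'z') ∨ ('A' ≤ c₀ ∧ c₀ ≤ 'Z')) ∧ (∀ b ∈ c₀ :: rest, b = c₀)
        ∧ min ≤ ((c₀ :: rest).length : Int) ∧ ((c₀ :: rest).length : Int) ≤ max) := by
  simp [List.any_eq_true]

-- the two ports agree
theorem pvMain (min max : Int) (stexto : String) :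
    containsConsecutiveIdenticalCharacters min max stexto =
      containsConsecutiveIdenticalCharacters_alt min max stexto := by
  unfold containsConsecutiveIdenticalCharacters containsConsecutiveIdenticalCharacters_alt
  rw [pvLista, Bool.eq_iff_iff]
  simp only [decide_eq_true_eq]
  cases ht : stexto.toList with
  | nil =>
    by_cases hmm : min > max
    · rw [if_pos hmm]
      simp only [Bool.false_eq_true, iff_false]
      intro hmem
      rw [List.mem_flatMap] at hmem
      obtain ⟨c, -, hmem⟩ := hmem
      rw [List.mem_flatMap] at hmem
      obtain ⟨q, hq, -⟩ := hmem
      rw [PySem.List.mem_pyRange_one] at hq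
      omega
    · rw [if_neg hmm, decide_eq_true_eq]
      constructor
      · intro hmem
        rw [List.mem_flatMap] at hmem
        obtain ⟨c, -, hmem⟩ := hmem
        rw [List.mem_flatMap] at hmem
        obtain ⟨q, hq, hmem⟩ := hmem
        rw [PySem.List.mem_pyRange_one] at hq
        simp only [List.mem_cons, List.not_mem_nil, or_false] at hmem
        have h0 : q.toNat = 0 := by
          rcases hmem with hmem | hmem <;>
          · have := congrArg List.length hmem
            simp at this
            omega
        omega
      · intro h0
        rw [List.mem_flatMap]
        refine ⟨'a', by decide, ?_⟩
        rw [List.mem_flatMap]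
        refine ⟨min, ?_, ?_⟩
        · rw [PySem.List.mem_pyRange_one]
          exact ⟨le_refl min, by omega⟩
        · have h0' : min.toNat = 0 := by omega
          simp [h0']
  | cons c₀ rest =>
    refine Iff.trans ?_ (pvBoolIff min max c₀ rest).symm
    constructor
    · intro hmem
      simp only [List.mem_flatMap, PySem.List.mem_pyRange_one, List.mem_cons,
        List.not_mem_nil, or_false] at hmem
      obtain ⟨c, hc, q, hq, hd⟩ := hmem
      exact pvFwd min max c₀ rest ⟨c, hc, q, hq, hd⟩
    · intro h
      obtain ⟨c, hc, q, hq, hd⟩ := pvBwd min max c₀ rest h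
      simp only [List.mem_flatMap, PySem.List.mem_pyRange_one, List.mem_cons,
        List.not_mem_nil, or_false]
      exact ⟨c, hc, q, hq, hd⟩

-- ===== VERDICT (by name: the statement is the Claim_ definition above) =====
theorem containsConsecutiveIdenticalCharacters_spec : Claim_equal_containsConsecutiveIdenticalCharacters := by
  intro min max stexto _
  exact pvMain min max stexto
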